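-- pv_equiv track=rewrite | github.com/eldo31/aqua-confluence | src/main.py | _build_absolute_offsets_from_relative
-- ===== SOURCE A (Python) =====
-- from typing import List, Optional
--
-- def _build_absolute_offsets_from_relative(tracks, rel_ms: List[int]) -> List[int]:
--     """
--     rel>0 : Mi démarre rel ms AVANT la fin de M(i-1)
--     rel=0 : Mi démarre EXACTEMENT à la fin de M(i-1)
--     rel<0 : Mi démarre |rel| ms APRÈS la fin de M(i-1)
--     """
--     offsets = [0,0,0,0,0]
--     def prev_existing(i):
--         j = i-1
--         while j >= 0 and (j >= len(tracks) or tracks[j] is None):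
--             j -= 1
--         return j
--     for i in range(1,5):
--         if i >= len(tracks) or tracks[i] is None:
--             continue
--         j = prev_existing(i)
--         if j < 0:
--             offsets[i] = 0
--         else:
--             prev_end = offsets[j] + len(tracks[j])
--             r = int(rel_ms[i]) if i < len(rel_ms) else 0
--             offsets[i] = max(0, prev_end - r)
--     return offsets
-- ===== SOURCE B (Python) =====
-- def _build_absolute_offsets_from_relative(tracks, rel_ms):
--     offsets = [0, 0, 0, 0, 0]
--     exist = [i for i in range(5) if i < len(tracks) and tracks[i] is not None]
--     for p, q in zip(exist, exist[1:]):
--         r = int(rel_ms[q]) if q < len(rel_ms) else 0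
--         offsets[q] = max(0, offsets[p] + len(tracks[p]) - r)
--     return offsets
-- ===== Notes on version B (the rewrite author's own statement) =====
-- stated objective: simpler
-- what changed: Instead of A's per-index backward-scanning prev_existing helper, B first collects the list of existing track indices in one comprehension and then fills offsets by iterating over its consecutive pairs.
import Mathlib
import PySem

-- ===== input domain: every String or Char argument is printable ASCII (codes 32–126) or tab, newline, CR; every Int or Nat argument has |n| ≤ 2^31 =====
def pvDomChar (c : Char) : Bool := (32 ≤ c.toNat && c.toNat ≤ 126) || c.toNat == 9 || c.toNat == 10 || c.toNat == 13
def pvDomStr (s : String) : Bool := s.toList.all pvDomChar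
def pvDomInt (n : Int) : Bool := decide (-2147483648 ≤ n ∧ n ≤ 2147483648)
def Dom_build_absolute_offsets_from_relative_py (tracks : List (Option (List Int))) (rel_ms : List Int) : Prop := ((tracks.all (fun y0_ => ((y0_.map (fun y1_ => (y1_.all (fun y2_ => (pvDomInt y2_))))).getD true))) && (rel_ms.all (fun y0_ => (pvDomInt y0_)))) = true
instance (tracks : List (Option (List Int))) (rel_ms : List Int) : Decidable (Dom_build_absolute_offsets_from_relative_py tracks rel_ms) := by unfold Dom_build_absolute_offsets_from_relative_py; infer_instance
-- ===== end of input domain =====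

-- B replaces A's per-index backward-scanning prev_existing helper by first collecting
-- the list of existing track indices and then filling offsets along its consecutive
-- pairs (objective: simpler).

-- ===== PORT A =====
-- 'i < len(tracks) and tracks[i] is not None' (exact: list indexing in range)
def pvExistsAt (tracks : List (Option (List Int))) (i : Nat) : Bool :=
  match tracks[i]? with
  | some (some _) => true
  | _ => false

-- 'len(tracks[j])' at an index known to hold a list (0 otherwise, never reached there)
def pvLenAt (tracks : List (Option (List Int))) (j : Nat) : Int :=
  match tracks[j]? with
  | some (some l) => (l.length : Int)
  | _ => 0

-- the 'while j >= 0 and (j >= len(tracks) or tracks[j] is None): j -= 1' loop of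
-- prev_existing(i), called with the Nat i (so j starts at i-1 and counts down)
def prevExistingA (tracks : List (Option (List Int))) : Nat → Int
  | 0 => -1
  | j + 1 => if pvExistsAt tracks j then (j : Int) else prevExistingA tracks j

-- one iteration of A's 'for i in range(1,5)' body over the offsets list
def stepA (tracks : List (Option (List Int))) (rel_ms : List Int)
    (offsets : List Int) (i : Nat) : List Int :=
  if pvExistsAt tracks i then
    let j := prevExistingA tracks i
    if j < 0 then offsets.set i 0
    else
      let jn := j.toNat
      let prev_end := offsets.getD jn 0 + pvLenAt tracks jn
      let r := if i < rel_ms.length then rel_ms.getD i 0 else 0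
      offsets.set i (max 0 (prev_end - r))
  else offsets

def build_absolute_offsets_from_relative_py (tracks : List (Option (List Int))) (rel_ms : List Int) : List Int :=
  [1, 2, 3, 4].foldl (stepA tracks rel_ms) [0, 0, 0, 0, 0]

-- ===== PORT B =====
-- 'for p, q in zip(exist, exist[1:]): offsets[q] = max(0, offsets[p] + len(tracks[p]) - r)'
def fillPairsB (tracks : List (Option (List Int))) (rel_ms : List Int)
    (offsets : List Int) : List (Nat × Nat) → List Int
  | [] => offsets
  | (p, q) :: rest =>
      let r := if q < rel_ms.length then rel_ms.getD q 0 else 0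
      let lenP : Int := match tracks[p]? with | some (some l) => (l.length : Int) | _ => 0
      fillPairsB tracks rel_ms
        (offsets.set q (max 0 (offsets.getD p 0 + lenP - r))) rest

def build_absolute_offsets_from_relative_py_alt (tracks : List (Option (List Int))) (rel_ms : List Int) : List Int :=
  let exist := (List.range 5).filter (fun i => (tracks[i]?.getD none).isSome)
  fillPairsB tracks rel_ms [0, 0, 0, 0, 0] (exist.zip exist.tail)

-- ===== PRECONDITION & SPEC =====
def Spec_build_absolute_offsets_from_relative_py (tracks : List (Option (List Int))) (rel_ms : List Int) (out : List Int) : Prop := out = build_absolute_offsets_from_relative_py_alt tracks rel_ms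
instance (tracks : List (Option (List Int))) (rel_ms : List Int) (out : List Int) : Decidable (Spec_build_absolute_offsets_from_relative_py tracks rel_ms out) := by unfold Spec_build_absolute_offsets_from_relative_py; infer_instance

-- ===== CLAIM (what is proved, stated in full; the proofs are below) =====
def Claim_equal_build_absolute_offsets_from_relative_py : Prop := ∀ (tracks : List (Option (List Int))) (rel_ms : List Int), Dom_build_absolute_offsets_from_relative_py tracks rel_ms → Spec_build_absolute_offsets_from_relative_py tracks rel_ms (build_absolute_offsets_from_relative_py tracks rel_ms)

-- ===== LEMMAS AND PROOFS =====
theorem existsAt_eq (tracks : List (Option (List Int))) (i : Nat) :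
    ((tracks[i]?.getD none).isSome) = pvExistsAt tracks i := by
  unfold pvExistsAt
  cases h : tracks[i]? with
  | none => simp
  | some o => cases o <;> simp

-- ===== VERDICT (by name: the statement is the Claim_ definition above) =====
theorem build_absolute_offsets_from_relative_py_spec : Claim_equal_build_absolute_offsets_from_relative_py := by
  intro tracks rel_ms _
  unfold Spec_build_absolute_offsets_from_relative_py
  unfold build_absolute_offsets_from_relative_py build_absolute_offsets_from_relative_py_alt
  by_cases h0 : pvExistsAt tracks 0 <;>
  by_cases h1 : pvExistsAt tracks 1 <;>
  by_cases h2 : pvExistsAt tracks 2 <;>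
  by_cases h3 : pvExistsAt tracks 3 <;>
  by_cases h4 : pvExistsAt tracks 4 <;>
    simp [stepA, prevExistingA, fillPairsB, pvLenAt, existsAt_eq,
      h0, h1, h2, h3, h4, List.range_succ, List.filter,
      List.foldl]
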